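-- pv_equiv track=rewrite | github.com/kyeryoong/online-judge | Implementation/P68645_삼각 달팽이.py | solution
-- ===== SOURCE A (Python) =====
-- def solution(n):
--     # 삼각 달팽이 배열을 초기화
--     array = [[0] * (i + 1) for i in range(0, n)]
--
--     x, y = 0, 0
--
--     # 아래, 오른쪽, 왼쪽 위 방향의 움직임
--     dx = [1, 0, -1]
--     dy = [0, 1, -1]
--
--     # 이동 방향
--     direction = 0
--
--     # 회전하기 전 이동해야 할 횟수
--     step = n
--
--
--     # 1부터 n(n+1)/2번 까지 반복하여 삼각 달팽이 배열을 채움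
--     for i in range(1, n * (n + 1) // 2 + 1):
--         array[x][y] = i
--
--         step = step - 1
--
--         # 이동해야 할 횟수가 0이되면
--         if step == 0:
--
--             # 방향을 전환
--             direction = direction + 1
--
--             # 이동해야 할 횟수를 1 감소
--             n = n - 1
--             step = n
--
--         # 다음 칸으로 이동
--         x = x + dx[direction % 3]
--         y = y + dy[direction % 3]
--
--
--     result = []
--
--     for a in array:
--         result = result + a
--
--
--     return result
-- ===== SOURCE B (Python) =====
-- def solution(n):
--     # Layer-by-layer fill: for each shrinking triangular ring, write its three
--     # edges (left column down, bottom row right, inner diagonal up) explicitly.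
--     rows = [[0] * (i + 1) for i in range(n)]
--     c = 1
--     R, C, m = 0, 0, n
--     while m > 0:
--         for k in range(m):                 # left column, downwards
--             rows[R + k][C] = c
--             c += 1
--         for j in range(1, m):              # bottom row, rightwards
--             rows[R + m - 1][C + j] = c
--             c += 1
--         for t in range(1, m - 1):          # inner diagonal, upwards
--             rows[R + m - 1 - t][C + m - 1 - t] = c
--             c += 1
--         R += 2
--         C += 1
--         m -= 3
--     return [v for row in rows for v in row]
-- ===== Notes on version B (the rewrite author's own statement) =====
-- stated objective: faster
-- what changed: Replaces A's single spiral walk driven by dx/dy direction arrays, a step countdown and a shrinking n with an explicit layer-by-layer fill that writes each triangular ring's three edges (left column down, bottom row right, inner diagonal up) in plain range loops, then moves to the inner triangle.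
-- crash fix: For every n at most minus two A raises IndexError (the comprehension builds an empty array but the fill loop still runs); B returns the empty list there. — e.g. on solution(-2): A raises IndexError, B returns []
import Mathlib
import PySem

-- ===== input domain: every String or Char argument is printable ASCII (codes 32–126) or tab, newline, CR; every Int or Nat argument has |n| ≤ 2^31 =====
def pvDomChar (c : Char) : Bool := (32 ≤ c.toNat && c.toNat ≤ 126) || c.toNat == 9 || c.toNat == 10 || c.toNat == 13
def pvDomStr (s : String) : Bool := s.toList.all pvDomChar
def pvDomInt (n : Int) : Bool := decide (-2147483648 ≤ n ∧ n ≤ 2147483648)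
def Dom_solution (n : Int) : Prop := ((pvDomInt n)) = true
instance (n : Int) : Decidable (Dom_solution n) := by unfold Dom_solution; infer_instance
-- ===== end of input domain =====

-- B replaces A's single spiral walk (dx/dy direction table + step countdown) by an
-- explicit layer-by-layer fill of each triangular ring's three edges; same return value.

-- ===== PORT A =====
-- rows[x][y] = v; exact for the nonnegative in-range indices every admitted run performs
-- (out-of-range assignment raises IndexError in Python; Pre_solution excludes those runs).
def setAt (arr : List (List Int)) (x y v : Int) : List (List Int) :=
  arr.modify x.toNat (fun row => row.set y.toNat v)

-- one iteration of A's for-loop; state (array, x, y, direction, step, n)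
def solutionStep (st : List (List Int) × Int × Int × Int × Int × Int) (i : Int) :
    List (List Int) × Int × Int × Int × Int × Int :=
  match st with
  | (arr, x, y, direction, step, n) =>
    let arr := setAt arr x y i
    let step := step - 1
    let dsn : Int × Int × Int :=
      if step = 0 then (direction + 1, n - 1, n - 1) else (direction, step, n)
    match dsn with
    | (direction, step, n) =>
      let x := x + PySem.List.pyGetD [1, 0, -1] (PySem.Int.mod direction 3) 0
      let y := y + PySem.List.pyGetD [0, 1, -1] (PySem.Int.mod direction 3) 0
      (arr, x, y, direction, step, n)

def solution (n : Int) : List Int :=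
  let array := (PySem.List.pyRange 0 n 1).map (fun i => PySem.List.pyRepeat [(0 : Int)] (i + 1))
  let st := (PySem.List.pyRange 1 (PySem.Int.floordiv (n * (n + 1)) 2 + 1) 1).foldl
      solutionStep (array, 0, 0, 0, n, n)
  st.1.foldl (fun acc a => acc ++ a) []

-- ===== PORT B =====
-- B's while-loop over layers; each layer writes its three edges (left column down,
-- bottom row right, inner diagonal up), then moves to the inner triangle.
def altLayers (arr : List (List Int)) (c R C m : Int) : List (List Int) :=
  if h : 0 < m then
    let p1 := (PySem.List.pyRange 0 m 1).foldl
        (fun (p : List (List Int) × Int) k => (setAt p.1 (R + k) C p.2, p.2 + 1)) (arr, c)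
    let p2 := (PySem.List.pyRange 1 m 1).foldl
        (fun (p : List (List Int) × Int) j => (setAt p.1 (R + m - 1) (C + j) p.2, p.2 + 1)) p1
    let p3 := (PySem.List.pyRange 1 (m - 1) 1).foldl
        (fun (p : List (List Int) × Int) t =>
          (setAt p.1 (R + m - 1 - t) (C + m - 1 - t) p.2, p.2 + 1)) p2
    altLayers p3.1 p3.2 (R + 2) (C + 1) (m - 3)
  else arr
termination_by m.toNat
decreasing_by omega

def solution_alt (n : Int) : List Int :=
  let rows := (PySem.List.pyRange 0 n 1).map (fun i => PySem.List.pyRepeat [(0 : Int)] (i + 1))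
  (altLayers rows 1 0 0 n).flatMap id

-- ===== PRECONDITION & SPEC =====
-- Pre_ excludes exactly n ≤ -2, where A's loop body indexes the empty array and raises IndexError.
def Pre_solution (n : Int) : Prop := -1 ≤ n
instance (n : Int) : Decidable (Pre_solution n) := by unfold Pre_solution; infer_instance
def pvWitness_solution : Int := (4)

-- For every n ≤ -2 A raises IndexError (the array is empty but the loop runs); B returns [].
def Raises_solution (n : Int) : Prop := n ≤ -2
instance (n : Int) : Decidable (Raises_solution n) := by unfold Raises_solution; infer_instance
def pvRaiseWitness_solution : Int := (-2)
def pvRaiseWitnessOut_solution : List Int := []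

def Spec_solution (n : Int) (out : List Int) : Prop := out = solution_alt n
instance (n : Int) (out : List Int) : Decidable (Spec_solution n out) := by unfold Spec_solution; infer_instance

-- ===== CLAIM (what is proved, stated in full; the proofs are below) =====
def Claim_equal_solution : Prop := ∀ (n : Int), Dom_solution n → Pre_solution n → Spec_solution n (solution n)
def Claim_raises_solution : Prop := (∀ (n : Int), Dom_solution n → Raises_solution n → ¬ Pre_solution n) ∧ (Dom_solution (pvRaiseWitness_solution) ∧ Raises_solution (pvRaiseWitness_solution) ∧ solution_alt (pvRaiseWitness_solution) = pvRaiseWitnessOut_solution)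

-- ===== LEMMAS AND PROOFS =====

-- the cells a straight run of writes touches: start (x,y), step (ex,ey), values c, c+1, …
def writeLine (arr : List (List Int)) (x y c ex ey : Int) : Nat → List (List Int)
  | 0 => arr
  | r + 1 => writeLine (setAt arr x y c) (x + ex) (y + ey) (c + 1) ex ey r

-- the number of loop iterations A spends on a triangle of size m (= m(m+1)/2)
def triN : Nat → Nat
  | 0 => 0
  | 1 => 1
  | 2 => 3
  | (k + 3) => 3 * k + 6 + triN k

-- A's movement table, as a function of the direction counter
def dxv (d : Int) : Int := PySem.List.pyGetD [1, 0, -1] (PySem.Int.mod d 3) 0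
def dyv (d : Int) : Int := PySem.List.pyGetD [0, 1, -1] (PySem.Int.mod d 3) 0

-- A straight run of A's loop: with step = r remaining, the next r counters write one
-- line of cells, then the direction turns and the head moves one step in the new direction.
lemma runA (r : Nat) (hr : 1 ≤ r) : ∀ (arr : List (List Int)) (x y d nn c : Int),
    (PySem.List.pyRange c (c + (r : Int)) 1).foldl solutionStep (arr, x, y, d, (r : Int), nn)
    = (writeLine arr x y c (dxv d) (dyv d) r,
       x + ((r : Int) - 1) * dxv d + dxv (d + 1),
       y + ((r : Int) - 1) * dyv d + dyv (d + 1), d + 1, nn - 1, nn - 1) := by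
  induction r with
  | zero => omega
  | succ s IH =>
    intro arr x y d nn c
    rcases Nat.eq_zero_or_pos s with hs | hs
    · subst hs
      rw [show ((1 : Nat) : Int) = 1 from rfl, PySem.List.pyRange_one_singleton]
      simp [solutionStep, writeLine, dxv, dyv]
    · have hlt : c < c + ((s + 1 : Nat) : Int) := by push_cast; omega
      rw [PySem.List.pyRange_one_cons hlt, List.foldl_cons]
      have hs0 : s ≠ 0 := by omega
      have hstep : solutionStep (arr, x, y, d, ((s + 1 : Nat) : Int), nn) c
          = (setAt arr x y c, x + dxv d, y + dyv d, d, (s : Int), nn) := by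
        simp [solutionStep, hs0, dxv, dyv]
      rw [hstep]
      have hb : c + ((s + 1 : Nat) : Int) = (c + 1) + (s : Int) := by push_cast; ring
      rw [hb, IH hs]
      simp [writeLine]
      constructor
      · push_cast; ring
      · push_cast; ring

-- B's edge loops are the same straight runs of writes
lemma foldl_edge (P Q ex ey : Int) : ∀ (m : Nat) (a : Int) (arr : List (List Int)) (cc : Int),
    (PySem.List.pyRange a (a + (m : Int)) 1).foldl
      (fun (p : List (List Int) × Int) k => (setAt p.1 (P + ex * k) (Q + ey * k) p.2, p.2 + 1)) (arr, cc)
    = (writeLine arr (P + ex * a) (Q + ey * a) cc ex ey m, cc + (m : Int)) := by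
  intro m
  induction m with
  | zero =>
    intro a arr cc
    rw [show a + ((0 : Nat) : Int) = a from by push_cast; ring, PySem.List.pyRange_one_eq_nil le_rfl]
    simp [writeLine]
  | succ s IH =>
    intro a arr cc
    have hlt : a < a + ((s + 1 : Nat) : Int) := by push_cast; omega
    rw [PySem.List.pyRange_one_cons hlt, List.foldl_cons]
    have hb : a + ((s + 1 : Nat) : Int) = (a + 1) + (s : Int) := by push_cast; ring
    rw [hb]
    have := IH (a + 1) (setAt arr (P + ex * a) (Q + ey * a) cc) (cc + 1)
    rw [show P + ex * (a + 1) = P + ex * a + ex from by ring,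
        show Q + ey * (a + 1) = Q + ey * a + ey from by ring] at this
    rw [this]
    simp [writeLine]
    push_cast; ring

lemma edge_down (R C : Int) (m : Nat) (a : Int) (arr : List (List Int)) (cc : Int) :
    (PySem.List.pyRange a (a + (m : Int)) 1).foldl
      (fun (p : List (List Int) × Int) k => (setAt p.1 (R + k) C p.2, p.2 + 1)) (arr, cc)
    = (writeLine arr (R + a) C cc 1 0 m, cc + (m : Int)) := by
  simpa using foldl_edge R C 1 0 m a arr cc

lemma edge_row (X C : Int) (m : Nat) (a : Int) (arr : List (List Int)) (cc : Int) :
    (PySem.List.pyRange a (a + (m : Int)) 1).foldl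
      (fun (p : List (List Int) × Int) j => (setAt p.1 X (C + j) p.2, p.2 + 1)) (arr, cc)
    = (writeLine arr X (C + a) cc 0 1 m, cc + (m : Int)) := by
  simpa using foldl_edge X C 0 1 m a arr cc

lemma edge_diag (X Y : Int) (m : Nat) (a : Int) (arr : List (List Int)) (cc : Int) :
    (PySem.List.pyRange a (a + (m : Int)) 1).foldl
      (fun (p : List (List Int) × Int) t => (setAt p.1 (X - t) (Y - t) p.2, p.2 + 1)) (arr, cc)
    = (writeLine arr (X - a) (Y - a) cc (-1) (-1) m, cc + (m : Int)) := by
  have h := foldl_edge X Y (-1) (-1) m a arr cc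
  simpa [neg_one_mul, ← sub_eq_add_neg] using h

lemma mod3_ev (d : Int) (hd : PySem.Int.mod d 3 = 0) :
    PySem.Int.mod (d + 1) 3 = 1 ∧ PySem.Int.mod (d + 2) 3 = 2 ∧ PySem.Int.mod (d + 3) 3 = 0 := by
  rw [PySem.Int.mod_eq_emod_of_pos (by norm_num)] at hd
  rw [PySem.Int.mod_eq_emod_of_pos (by norm_num), PySem.Int.mod_eq_emod_of_pos (by norm_num),
      PySem.Int.mod_eq_emod_of_pos (by norm_num)]
  omega

-- the core induction: A's loop over the next triN m counters = B's layer recursion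
lemma layers_eq : ∀ (m : Nat) (arr : List (List Int)) (R C c d : Int),
    PySem.Int.mod d 3 = 0 →
    ((PySem.List.pyRange c (c + (triN m : Int)) 1).foldl solutionStep
        (arr, R, C, d, (m : Int), (m : Int))).1
    = altLayers arr c R C (m : Int) := by
  intro m
  induction m using Nat.strong_induction_on with
  | _ m IH =>
  intro arr R C c d hd
  obtain ⟨h1, h2, h3⟩ := mod3_ev d hd
  have dx0 : dxv d = 1 := by rw [dxv, hd]; decide
  have dy0 : dyv d = 0 := by rw [dyv, hd]; decide
  have dx1 : dxv (d + 1) = 0 := by rw [dxv, h1]; decide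
  have dy1 : dyv (d + 1) = 1 := by rw [dyv, h1]; decide
  have dx2 : dxv (d + 2) = -1 := by rw [dxv, h2]; decide
  have dy2 : dyv (d + 2) = -1 := by rw [dyv, h2]; decide
  have dx3 : dxv (d + 3) = 1 := by rw [dxv, h3]; decide
  have dy3 : dyv (d + 3) = 0 := by rw [dyv, h3]; decide
  rcases m with _ | _ | _ | t
  · -- m = 0
    rw [show ((triN 0 : Nat) : Int) = 0 from rfl, add_zero,
        PySem.List.pyRange_one_eq_nil le_rfl]
    rw [altLayers]
    norm_num
  · -- m = 1
    rw [show ((triN 1 : Nat) : Int) = 1 from rfl, PySem.List.pyRange_one_singleton]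
    rw [altLayers]
    norm_num
    rw [show PySem.List.pyRange 0 1 1 = [(0 : Int)] from by decide]
    rw [altLayers]
    norm_num [solutionStep]
  · -- m = 2
    rw [show ((triN 2 : Nat) : Int) = 3 from rfl]
    rw [PySem.List.pyRange_one_append c (c + 2) (c + 3) (by omega) (by omega),
        List.foldl_append]
    have E1 := runA 2 (by omega) arr R C d 2 c
    rw [dx0, dy0, dx1, dy1] at E1
    norm_num at E1
    push_cast
    rw [E1]
    have E2 := runA 1 (by omega) (writeLine arr R C c 1 0 2) (R + 1) (C + 1) (d + 1) 1 (c + 2)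
    rw [show d + 1 + 1 = d + 2 from by ring] at E2
    rw [dx1, dy1, dx2, dy2] at E2
    norm_num at E2
    rw [show PySem.List.pyRange (c + 2) (c + 3) 1 = [c + 2] from by
          rw [show c + 3 = (c + 2) + 1 from by ring, PySem.List.pyRange_one_singleton]]
    rw [List.foldl_cons, E2]
    rw [altLayers]
    norm_num
    have F1 := edge_down R C 2 0 arr c
    norm_num at F1
    rw [F1]
    rw [show PySem.List.pyRange 1 2 1 = [(1 : Int)] from by decide]
    rw [altLayers]
    norm_num [writeLine]
    ring_nf
  · -- m = t + 3
    have htri : ((triN (t + 3) : Nat) : Int) = 3 * (t : Int) + 6 + ((triN t : Nat) : Int) := by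
      rw [show triN (t + 3) = 3 * t + 6 + triN t from rfl]; push_cast; ring
    rw [htri]
    push_cast
    rw [show (t : Int) + 1 + 1 + 1 = (t : Int) + 3 from by ring]
    rw [PySem.List.pyRange_one_append c (c + ((t : Int) + 3))
          (c + (3 * (t : Int) + 6 + ((triN t : Nat) : Int))) (by omega) (by omega),
        List.foldl_append]
    have E1 := runA (t + 3) (by omega) arr R C d ((t : Int) + 3) c
    rw [dx0, dy0, dx1, dy1] at E1
    push_cast at E1
    norm_num at E1
    rw [E1]
    rw [show (t : Int) + 3 - 1 = (t : Int) + 2 from by ring]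
    rw [PySem.List.pyRange_one_append (c + ((t : Int) + 3)) (c + ((t : Int) + 3) + ((t : Int) + 2))
          (c + (3 * (t : Int) + 6 + ((triN t : Nat) : Int))) (by omega) (by omega),
        List.foldl_append]
    have E2 := runA (t + 2) (by omega) (writeLine arr R C c 1 0 (t + 3)) (R + ((t : Int) + 2))
        (C + 1) (d + 1) ((t : Int) + 2) (c + ((t : Int) + 3))
    rw [show d + 1 + 1 = d + 2 from by ring] at E2
    rw [dx1, dy1, dx2, dy2] at E2
    push_cast at E2
    norm_num at E2
    rw [E2]
    rw [show (t : Int) + 2 - 1 = (t : Int) + 1 from by ring,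
        show R + ((t : Int) + 2) + -1 = R + ((t : Int) + 1) from by ring,
        show C + ((t : Int) + 2) + -1 = C + ((t : Int) + 1) from by ring]
    rw [PySem.List.pyRange_one_append (c + ((t : Int) + 3) + ((t : Int) + 2))
          (c + ((t : Int) + 3) + ((t : Int) + 2) + ((t : Int) + 1))
          (c + (3 * (t : Int) + 6 + ((triN t : Nat) : Int))) (by omega) (by omega),
        List.foldl_append]
    have E3 := runA (t + 1) (by omega)
        (writeLine (writeLine arr R C c 1 0 (t + 3)) (R + ((t : Int) + 2)) (C + 1)
          (c + ((t : Int) + 3)) 0 1 (t + 2))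
        (R + ((t : Int) + 1)) (C + ((t : Int) + 1)) (d + 2) ((t : Int) + 1)
        (c + ((t : Int) + 3) + ((t : Int) + 2))
    rw [show d + 2 + 1 = d + 3 from by ring] at E3
    rw [dx2, dy2, dx3, dy3] at E3
    push_cast at E3
    rw [E3]
    rw [show R + ((t : Int) + 1) + ((t : Int) + 1 - 1) * -1 + 1 = R + 2 from by ring,
        show C + ((t : Int) + 1) + ((t : Int) + 1 - 1) * -1 + 0 = C + 1 from by ring,
        show (t : Int) + 1 - 1 = (t : Int) from by ring,
        show c + (3 * (t : Int) + 6 + ((triN t : Nat) : Int))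
            = (c + ((t : Int) + 3) + ((t : Int) + 2) + ((t : Int) + 1)) + ((triN t : Nat) : Int)
          from by ring]
    rw [IH t (by omega) _ (R + 2) (C + 1) (c + ((t : Int) + 3) + ((t : Int) + 2) + ((t : Int) + 1))
        (d + 3) h3]
    conv_rhs => rw [altLayers]
    rw [dif_pos (show (0 : Int) < (t : Int) + 3 from by omega)]
    have F1 := edge_down R C (t + 3) 0 arr c
    push_cast at F1
    norm_num at F1
    rw [F1]
    dsimp only
    rw [show R + ((t : Int) + 3) - 1 = R + ((t : Int) + 2) from by ring,
        show C + ((t : Int) + 3) - 1 = C + ((t : Int) + 2) from by ring,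
        show ((t : Int) + 3) - 1 = (t : Int) + 2 from by ring,
        show ((t : Int) + 3) - 3 = (t : Int) from by ring]
    have F2 := edge_row (R + ((t : Int) + 2)) C (t + 2) 1 (writeLine arr R C c 1 0 (t + 3))
        (c + ((t : Int) + 3))
    push_cast at F2
    rw [show (1 : Int) + ((t : Int) + 2) = (t : Int) + 3 from by ring] at F2
    rw [F2]
    have F3 := edge_diag (R + ((t : Int) + 2)) (C + ((t : Int) + 2)) (t + 1) 1
        (writeLine (writeLine arr R C c 1 0 (t + 3)) (R + ((t : Int) + 2)) (C + 1)
          (c + ((t : Int) + 3)) 0 1 (t + 2))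
        (c + ((t : Int) + 3) + ((t : Int) + 2))
    push_cast at F3
    rw [show (1 : Int) + ((t : Int) + 1) = (t : Int) + 2 from by ring] at F3
    rw [F3]
    dsimp only
    rw [show R + ((t : Int) + 2) - 1 = R + ((t : Int) + 1) from by ring,
        show C + ((t : Int) + 2) - 1 = C + ((t : Int) + 1) from by ring]

lemma triN_mul2 : ∀ k : Nat, 2 * triN k = k * (k + 1) := by
  intro k
  induction k using Nat.strong_induction_on with
  | _ k IH =>
  rcases k with _ | _ | _ | t
  · rfl
  · rfl
  · rfl
  · have h := IH t (by omega)
    rw [show triN (t + 3) = 3 * t + 6 + triN t from rfl]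
    ring_nf
    ring_nf at h
    nlinarith [h]

lemma hdiv (n : Int) (h : 0 ≤ n) :
    PySem.Int.floordiv (n * (n + 1)) 2 = ((triN n.toNat : Nat) : Int) := by
  rw [PySem.Int.floordiv_eq_iff_of_pos (by norm_num)]
  have hk : n = ((n.toNat : Nat) : Int) := (Int.toNat_of_nonneg h).symm
  have h2 : 2 * triN n.toNat = n.toNat * (n.toNat + 1) := triN_mul2 n.toNat
  have h2' : (2 : Int) * ((triN n.toNat : Nat) : Int) = n * (n + 1) := by
    rw [hk]; exact_mod_cast h2
  constructor <;> linarith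

-- ===== VERDICT (by name: the statement is the Claim_ definition above) =====
theorem solution_spec : Claim_equal_solution := by
  intro n _ hpre
  unfold Pre_solution at hpre
  unfold Spec_solution
  by_cases h : 0 ≤ n
  · have hn : n = ((n.toNat : Nat) : Int) := (Int.toNat_of_nonneg h).symm
    simp only [solution, solution_alt]
    rw [hdiv n h]
    rw [show ((triN n.toNat : Nat) : Int) + 1 = 1 + ((triN n.toNat : Nat) : Int) from by ring]
    rw [hn]
    simp only [Int.toNat_natCast]
    rw [layers_eq n.toNat _ 0 0 1 0 (by decide)]
    rw [PySem.List.foldl_append_eq_flatten]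
    simp
  · have hn : n = -1 := by omega
    subst hn
    norm_num [solution, solution_alt]
    rw [altLayers]
    norm_num

@[simp]
theorem solution_raises : Claim_raises_solution := by
  unfold Claim_raises_solution
  refine ⟨fun n _ h => by unfold Raises_solution at h; unfold Pre_solution; omega, by decide, by decide, ?_⟩
  show solution_alt (-2) = []
  norm_num [solution_alt]
  rw [altLayers]
  norm_num
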